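-- pv_equiv track=rewrite | github.com/gyorilab/indra_cogex | src/indra_cogex/sources/interpro/__init__.py | descend
-- ===== SOURCE A (Python) =====
-- def descend(lines):
--     if not lines:
--         return {}
--     groups = {}
--     # Assume the first one is always a root.
--     parent, *lines = lines
--     group = []
--     for line in lines:
--         if line.startswith("--"):
--             group.append(line[2:])
--         else:
--             # save the previous group
--             groups[parent] = group
--             # set a new parent
--             parent = line
--             group = []
--     # don't forget about the last one
--     groups[parent] = group
--     return groups
-- ===== SOURCE B (Python) =====
-- # B: index-and-span two-phase scan instead of A's deferred-save stateful accumulator; same O(n), simpler bookkeeping.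
-- def descend(lines):
--     groups = {}
--     n = len(lines)
--     i = 0
--     while i < n:
--         j = i + 1
--         while j < n and lines[j].startswith("--"):
--             j += 1
--         groups[lines[i]] = [l[2:] for l in lines[i + 1:j]]
--         i = j
--     return groups
-- ===== Notes on version B (the rewrite author's own statement) =====
-- stated objective: simpler
-- what changed: Replaces A's stateful deferred-save accumulator (pending parent/group carried through the loop, saved on the next parent and once more after the loop) with a two-phase span scan: each parent's child block is located by an inner scan and sliced off in one step, so no pending state or final flush exists.
import Mathlib
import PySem

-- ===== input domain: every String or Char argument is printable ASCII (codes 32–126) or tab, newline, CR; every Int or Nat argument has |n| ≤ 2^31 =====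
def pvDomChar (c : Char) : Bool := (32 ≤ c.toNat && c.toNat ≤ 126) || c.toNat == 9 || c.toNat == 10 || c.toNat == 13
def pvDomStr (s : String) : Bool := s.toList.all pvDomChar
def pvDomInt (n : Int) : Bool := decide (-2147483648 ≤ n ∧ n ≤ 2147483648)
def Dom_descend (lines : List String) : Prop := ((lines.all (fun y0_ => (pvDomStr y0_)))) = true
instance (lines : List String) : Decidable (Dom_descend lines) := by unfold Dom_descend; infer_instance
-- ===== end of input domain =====

-- B replaces A's deferred-save stateful accumulator with a span-based two-phase scan (find the block of "--" children, slice, advance); same cost, simpler bookkeeping.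

-- ===== PORT A =====
-- A: fold over the tail carrying (groups, parent, group); save the pending group on each new parent, and once more at the end.
def descend (lines : List String) : List (String × List String) :=
  match lines with
  | [] => []
  | parent :: rest =>
    let st := rest.foldl
      (fun (s : PySem.Dict String (List String) × String × List String) line =>
        if PySem.Str.startswith line "--" then
          (s.1, s.2.1, s.2.2 ++ [PySem.Str.slice line (some 2) none])
        else
          (s.1.insert s.2.1 s.2.2, line, []))
      (PySem.Dict.empty, parent, [])
    (st.1.insert st.2.1 st.2.2).items

-- ===== PORT B =====
-- B: take the head as parent, span off its "--"-children block, insert, recurse on the remainder.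
def descendAltGo : List String → PySem.Dict String (List String) → PySem.Dict String (List String)
  | [], g => g
  | p :: rest, g =>
    let ch := rest.takeWhile (fun l => PySem.Str.startswith l "--")
    let rest' := rest.dropWhile (fun l => PySem.Str.startswith l "--")
    descendAltGo rest' (g.insert p (ch.map (fun l => PySem.Str.slice l (some 2) none)))
termination_by ls => ls.length
decreasing_by
  exact Nat.lt_succ_of_le (List.length_dropWhile_le _ _)

def descend_alt (lines : List String) : List (String × List String) :=
  (descendAltGo lines PySem.Dict.empty).items

-- ===== PRECONDITION & SPEC =====
def Spec_descend (lines : List String) (out : List (String × List String)) : Prop := out = descend_alt lines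
instance (lines : List String) (out : List (String × List String)) : Decidable (Spec_descend lines out) := by unfold Spec_descend; infer_instance

-- ===== CLAIM (what is proved, stated in full; the proofs are below) =====
def Claim_equal_descend : Prop := ∀ (lines : List String), Dom_descend lines → Spec_descend lines (descend lines)

-- ===== LEMMAS AND PROOFS =====

-- A's loop with pending state (g, p, grp), finished by the final save, equals B's span recursion
-- started after stripping the current child block.
lemma descend_loop_eq (ls : List String) (g : PySem.Dict String (List String))
    (p : String) (grp : List String) :
    (let st := ls.foldl
      (fun (s : PySem.Dict String (List String) × String × List String) line =>
        if PySem.Str.startswith line "--" then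
          (s.1, s.2.1, s.2.2 ++ [PySem.Str.slice line (some 2) none])
        else
          (s.1.insert s.2.1 s.2.2, line, []))
      (g, p, grp)
     st.1.insert st.2.1 st.2.2) =
    descendAltGo (ls.dropWhile (fun l => PySem.Str.startswith l "--"))
      (g.insert p (grp ++ (ls.takeWhile (fun l => PySem.Str.startswith l "--")).map
        (fun l => PySem.Str.slice l (some 2) none))) := by
  induction ls generalizing g p grp with
  | nil =>
    simp only [List.takeWhile_nil, List.dropWhile_nil, List.map_nil, List.append_nil,
      List.foldl_nil]
    rw [descendAltGo]
  | cons l ls ih =>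
    by_cases h : PySem.Str.startswith l "--" = true
    · simp only [List.foldl_cons, List.takeWhile_cons, List.dropWhile_cons, h,
        ite_true, List.map_cons]
      rw [ih]
      simp only [List.append_assoc, List.cons_append, List.nil_append]
    · simp only [List.foldl_cons, List.takeWhile_cons, List.dropWhile_cons, h,
        Bool.false_eq_true, ite_false, List.map_nil, List.append_nil]
      rw [ih]
      rw [descendAltGo]
      simp only [List.nil_append]

-- ===== VERDICT (by name: the statement is the Claim_ definition above) =====
theorem descend_spec : Claim_equal_descend := by
  intro lines _
  unfold Spec_descend
  cases lines with
  | nil =>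
    show descend [] = descend_alt []
    unfold descend_alt
    rw [descendAltGo]
    rfl
  | cons p rest =>
    have h := descend_loop_eq rest PySem.Dict.empty p []
    simp only [List.nil_append] at h
    refine Eq.trans (congrArg PySem.Dict.items h) ?_
    unfold descend_alt
    rw [descendAltGo]
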